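-- pv_equiv track=rewrite | github.com/mrisoli/eulerian | python/problem65.py | solve
-- ===== SOURCE A (Python) =====
-- def solve(v):
--     n,p,f = 2,1,1
--     for i in range(2, v + 1):
--         t = p
--
--         if i % 3 == 0:
--             f = 2 * (i // 3)
--         else:
--             f = 1
--         p = n
--         n = f * p + t
--     return n
-- ===== SOURCE B (Python) =====
-- def solve(v):
--     # Numerator of the e continued-fraction convergent, via binary splitting:
--     # product of transfer matrices [[c_i,1],[1,0]] for i in [2, v+1), applied to (2, 1).
--     def coeff(i):
--         return 2 * (i // 3) if i % 3 == 0 else 1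
--
--     def mul(A, B):
--         (a, b), (c, d) = A
--         (e, f), (g, h) = B
--         return ((a * e + b * g, a * f + b * h), (c * e + d * g, c * f + d * h))
--
--     def prod(lo, hi):
--         # product M(hi-1) * ... * M(lo) over the half-open range [lo, hi)
--         if hi - lo <= 0:
--             return ((1, 0), (0, 1))
--         if hi - lo == 1:
--             c = coeff(lo)
--             return ((c, 1), (1, 0))
--         mid = (lo + hi) // 2
--         return mul(prod(mid, hi), prod(lo, mid))
--
--     P = prod(2, v + 1)
--     return P[0][0] * 2 + P[0][1] * 1
-- ===== Notes on version B (the rewrite author's own statement) =====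
-- stated objective: alternative
-- what changed: B replaces A's linear three-variable recurrence by a divide-and-conquer binary splitting: it builds 2x2 transfer matrices [[c_i,1],[1,0]] for the continued-fraction coefficients, multiplies them by recursive halving of the index range, and applies the product matrix to the initial vector (2,1).
import Mathlib
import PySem

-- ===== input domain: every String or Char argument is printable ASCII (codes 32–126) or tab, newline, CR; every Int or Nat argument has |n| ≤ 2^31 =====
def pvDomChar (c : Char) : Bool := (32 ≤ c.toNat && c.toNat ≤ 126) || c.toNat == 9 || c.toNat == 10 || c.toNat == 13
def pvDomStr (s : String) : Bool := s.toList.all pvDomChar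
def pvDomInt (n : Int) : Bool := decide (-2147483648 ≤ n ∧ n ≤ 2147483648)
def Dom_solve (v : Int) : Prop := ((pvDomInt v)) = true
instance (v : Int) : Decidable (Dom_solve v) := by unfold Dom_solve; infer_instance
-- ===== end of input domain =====

-- B replaces A's linear recurrence by divide-and-conquer binary splitting of 2x2 transfer matrices; same result, different algorithm shape.


-- ===== PORT A =====
-- A's loop over range(2, v+1) with state (n, p); f and t are the per-iteration temporaries.
def solve (v : Int) : Int :=
  (((PySem.List.pyRange 2 (v + 1) 1).foldl
    (fun (st : Int × Int) i =>
      let t := st.2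
      let f := if PySem.Int.mod i 3 = 0 then 2 * PySem.Int.floordiv i 3 else 1
      let p := st.1
      (f * p + t, p)) (2, 1))).1

-- ===== PORT B =====
-- Source B's coeff helper
def coeffB (i : Int) : Int :=
  if PySem.Int.mod i 3 = 0 then 2 * PySem.Int.floordiv i 3 else 1

-- Source B's mul helper: 2x2 integer matrix product
def matMul (A B : (Int × Int) × (Int × Int)) : (Int × Int) × (Int × Int) :=
  ((A.1.1 * B.1.1 + A.1.2 * B.2.1, A.1.1 * B.1.2 + A.1.2 * B.2.2),
   (A.2.1 * B.1.1 + A.2.2 * B.2.1, A.2.1 * B.1.2 + A.2.2 * B.2.2))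

-- Source B's prod helper: product M(hi-1) * ... * M(lo) by recursive halving of [lo, hi)
def matProd (lo hi : Int) : (Int × Int) × (Int × Int) :=
  if _h0 : hi - lo ≤ 0 then ((1, 0), (0, 1))
  else if _h1 : hi - lo = 1 then ((coeffB lo, 1), (1, 0))
  else
    matMul (matProd (PySem.Int.floordiv (lo + hi) 2) hi)
           (matProd lo (PySem.Int.floordiv (lo + hi) 2))
termination_by (hi - lo).toNat
decreasing_by
  · rw [PySem.Int.floordiv_eq_ediv_of_pos (by omega)]; omega
  · rw [PySem.Int.floordiv_eq_ediv_of_pos (by omega)]; omega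

def solve_alt (v : Int) : Int :=
  let P := matProd 2 (v + 1)
  P.1.1 * 2 + P.1.2 * 1

-- ===== PRECONDITION & SPEC =====
def Spec_solve (v : Int) (out : Int) : Prop := out = solve_alt v
instance (v : Int) (out : Int) : Decidable (Spec_solve v out) := by unfold Spec_solve; infer_instance

-- ===== CLAIM (what is proved, stated in full; the proofs are below) =====
def Claim_equal_solve : Prop := ∀ (v : Int), Dom_solve v → Spec_solve v (solve v)

-- ===== LEMMAS AND PROOFS =====

-- the transfer matrix at index i
def matOf (i : Int) : (Int × Int) × (Int × Int) := ((coeffB i, 1), (1, 0))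

-- right-to-left product of the transfer matrices of a list of indices
def matList : List Int → (Int × Int) × (Int × Int)
  | [] => ((1, 0), (0, 1))
  | x :: xs => matMul (matList xs) (matOf x)

theorem matMul_assoc (A B C : (Int × Int) × (Int × Int)) :
    matMul (matMul A B) C = matMul A (matMul B C) := by
  simp only [matMul, Prod.mk.injEq]; constructor <;> constructor <;> ring

theorem matList_append (l1 l2 : List Int) :
    matList (l1 ++ l2) = matMul (matList l2) (matList l1) := by
  induction l1 with
  | nil => simp [matList, matMul]
  | cons x xs ih => simp [matList, ih, matMul_assoc]

-- A's fold is the action of the matrix product on the state vector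
theorem foldA_eq_matList (l : List Int) (n p : Int) :
    (l.foldl
      (fun (st : Int × Int) i =>
        let t := st.2
        let f := if PySem.Int.mod i 3 = 0 then 2 * PySem.Int.floordiv i 3 else 1
        let p := st.1
        (f * p + t, p)) (n, p))
    = ((matList l).1.1 * n + (matList l).1.2 * p,
       (matList l).2.1 * n + (matList l).2.2 * p) := by
  induction l generalizing n p with
  | nil => simp [matList]
  | cons x xs ih =>
    simp only [List.foldl_cons]
    rw [ih]
    simp only [matList, matMul, matOf, coeffB]
    split_ifs <;> simp only [Prod.mk.injEq] <;> constructor <;> ring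

-- Source B's recursive prod equals the list product over pyRange
theorem matProd_eq_matList (lo hi : Int) :
    matProd lo hi = matList (PySem.List.pyRange lo hi 1) := by
  generalize hk : (hi - lo).toNat = k
  induction k using Nat.strong_induction_on generalizing lo hi with
  | _ k ih =>
    rw [matProd]
    by_cases h0 : hi - lo ≤ 0
    · rw [PySem.List.pyRange_one_eq_nil (by omega)]
      simp [h0, matList]
    · by_cases h1 : hi - lo = 1
      · rw [PySem.List.pyRange_one_cons (by omega),
            PySem.List.pyRange_one_eq_nil (by omega)]
        simp [h1, matList, matOf, matMul]
      · have hmid : PySem.Int.floordiv (lo + hi) 2 = (lo + hi) / 2 :=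
          PySem.Int.floordiv_eq_ediv_of_pos (by omega)
        have hlo : lo ≤ (lo + hi) / 2 := by omega
        have hhi : (lo + hi) / 2 ≤ hi := by omega
        rw [dif_neg h0, dif_neg h1, hmid,
            PySem.List.pyRange_one_append lo ((lo + hi) / 2) hi hlo hhi,
            matList_append,
            ih (hi - (lo + hi) / 2).toNat (by omega) _ _ rfl,
            ih ((lo + hi) / 2 - lo).toNat (by omega) _ _ rfl]

-- ===== VERDICT (by name: the statement is the Claim_ definition above) =====
theorem solve_spec : Claim_equal_solve := by
  intro v _
  unfold Spec_solve solve solve_alt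
  rw [foldA_eq_matList, matProd_eq_matList]
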